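-- pv_equiv track=rewrite | github.com/beckermr/pizza-cutter-sims | pizza_cutter_sims/parsl.py | _chunker
-- ===== SOURCE A (Python) =====
-- def _chunker(seq, size):
--     res = []
--     for el in seq:
--         res.append(el)
--         if len(res) == size:
--             yield res
--             res = []
--     if res:
--         yield res
-- ===== SOURCE B (Python) =====
-- from itertools import islice
--
--
-- def _chunker(seq, size):
--     it = iter(seq)
--     while True:
--         chunk = list(islice(it, size))
--         if not chunk:
--             return
--         yield chunk
-- ===== Notes on version B (the rewrite author's own statement) =====
-- stated objective: idiomatic
-- what changed: B pulls whole chunks from an explicit iterator with itertools.islice instead of accumulating element-by-element in Python and testing the running length against size.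
-- outside the precondition, e.g. on _chunker([1, 2], 0): A returns [[1, 2]], B returns []; on _chunker([1, 2], -1): A returns [[1, 2]], B raises ValueError
import Mathlib
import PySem

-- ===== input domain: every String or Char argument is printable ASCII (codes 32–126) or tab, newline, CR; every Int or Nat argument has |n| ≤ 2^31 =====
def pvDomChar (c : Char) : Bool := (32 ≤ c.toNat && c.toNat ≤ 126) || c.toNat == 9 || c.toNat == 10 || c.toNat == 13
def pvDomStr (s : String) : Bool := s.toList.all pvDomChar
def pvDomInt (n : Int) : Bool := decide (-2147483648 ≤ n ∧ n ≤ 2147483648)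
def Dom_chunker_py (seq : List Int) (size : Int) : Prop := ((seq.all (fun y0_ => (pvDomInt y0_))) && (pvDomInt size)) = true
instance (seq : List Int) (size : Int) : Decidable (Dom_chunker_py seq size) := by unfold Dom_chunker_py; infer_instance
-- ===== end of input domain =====

-- B chunks via an explicit iterator and itertools.islice instead of A's element-by-element accumulator (objective: idiomatic).

-- ===== PORT A =====
-- fold over seq with state (yielded chunks, current partial chunk); final flush of a non-empty partial chunk
def chunker_py (seq : List Int) (size : Int) : List (List Int) :=
  let st := seq.foldl
    (fun (st : List (List Int) × List Int) el =>
      let res := st.2 ++ [el]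
      if (res.length : Int) = size then (st.1 ++ [res], []) else (st.1, res))
    ([], [])
  if st.2 ≠ [] then st.1 ++ [st.2] else st.1

-- ===== PORT B =====
-- chunk = list(islice(it, size)) is take, advancing the iterator is drop; stop on an empty chunk.
-- Pre_ restricts to 1 ≤ size (islice raises on negative sizes), so the port reads size as a Nat.
def chunkerAltAux (n : Nat) (seq : List Int) : List (List Int) :=
  if h : seq = [] ∨ n = 0 then []
  else seq.take n :: chunkerAltAux n (seq.drop n)
termination_by seq.length
decreasing_by
  simp only [not_or] at h
  have : 0 < seq.length := List.length_pos_iff.mpr h.1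
  simp [List.length_drop]; omega

def chunker_py_alt (seq : List Int) (size : Int) : List (List Int) :=
  chunkerAltAux size.toNat seq

-- ===== PRECONDITION & SPEC =====
-- Pre_ excludes non-positive sizes: there A's "whole sequence as one chunk" is an accident of its
-- length check never firing, while B's islice raises ValueError for negative sizes and yields nothing for zero.
def Pre_chunker_py (seq : List Int) (size : Int) : Prop := 1 ≤ size
instance (seq : List Int) (size : Int) : Decidable (Pre_chunker_py seq size) := by unfold Pre_chunker_py; infer_instance
def pvWitness_chunker_py : List Int × Int := ([1, 2, 3, 4, 5], 2)

def Spec_chunker_py (seq : List Int) (size : Int) (out : List (List Int)) : Prop := out = chunker_py_alt seq size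
instance (seq : List Int) (size : Int) (out : List (List Int)) : Decidable (Spec_chunker_py seq size out) := by unfold Spec_chunker_py; infer_instance

-- ===== CLAIM (what is proved, stated in full; the proofs are below) =====
def Claim_equal_chunker_py : Prop := ∀ (seq : List Int) (size : Int), Dom_chunker_py seq size → Pre_chunker_py seq size → Spec_chunker_py seq size (chunker_py seq size)

-- ===== LEMMAS AND PROOFS =====

lemma chunkerAltAux_cons (n : Nat) (seq : List Int) (hs : seq ≠ []) (hn : n ≠ 0) :
    chunkerAltAux n seq = seq.take n :: chunkerAltAux n (seq.drop n) := by
  rw [chunkerAltAux]; simp [hs, hn]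

-- loop invariant: running A's fold from state (out, res) with |res| < n and then flushing
-- equals out ++ the islice-chunking of res ++ seq
lemma fold_spec (n : Nat) (hn : 1 ≤ n) :
    ∀ (seq : List Int) (out : List (List Int)) (res : List Int), res.length < n →
    (let st := seq.foldl
        (fun (st : List (List Int) × List Int) el =>
          let r := st.2 ++ [el]
          if (r.length : Int) = (n : Int) then (st.1 ++ [r], []) else (st.1, r))
        (out, res)
     if st.2 ≠ [] then st.1 ++ [st.2] else st.1)
    = out ++ chunkerAltAux n (res ++ seq) := by
  intro seq
  induction seq with
  | nil =>
    intro out res hlt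
    simp only [List.foldl_nil, List.append_nil]
    by_cases hres : res = []
    · subst hres
      rw [chunkerAltAux]; simp
    · rw [chunkerAltAux_cons n res hres (by omega)]
      have ht : res.take n = res := List.take_of_length_le (by omega)
      have hd : res.drop n = [] := List.drop_eq_nil_of_le (by omega)
      rw [ht, hd, chunkerAltAux]
      simp [hres]
  | cons el rest ih =>
    intro out res hlt
    simp only [List.foldl_cons]
    by_cases hfull : ((res ++ [el]).length : Int) = (n : Int)
    · have hlen : (res ++ [el]).length = n := by exact_mod_cast hfull
      simp only [hfull, if_pos]
      rw [ih (out ++ [res ++ [el]]) [] (by simp only [List.length_nil]; omega)]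
      have hne : res ++ el :: rest ≠ [] := by simp
      rw [show res ++ el :: rest = (res ++ [el]) ++ rest by simp]
      rw [chunkerAltAux_cons n ((res ++ [el]) ++ rest) (by simp) (by omega)]
      rw [List.take_append_of_le_length (by omega), List.drop_append_of_le_length (by omega)]
      rw [List.take_of_length_le (by omega), List.drop_eq_nil_of_le (by omega)]
      simp
    · have hlen : (res ++ [el]).length ≠ n := by
        intro h; exact hfull (by exact_mod_cast h)
      have hlt' : (res ++ [el]).length < n := by
        simp only [List.length_append, List.length_singleton] at *
        omega
      simp only [hfull, if_neg, not_false_iff]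
      rw [ih out (res ++ [el]) hlt']
      simp

-- ===== VERDICT (by name: the statement is the Claim_ definition above) =====
theorem chunker_py_spec : Claim_equal_chunker_py := by
  intro seq size _ hpre
  unfold Spec_chunker_py chunker_py chunker_py_alt
  have hn : 1 ≤ size.toNat := by unfold Pre_chunker_py at hpre; omega
  have hcast : (size.toNat : Int) = size := Int.toNat_of_nonneg (by unfold Pre_chunker_py at hpre; omega)
  have := fold_spec size.toNat hn seq [] [] (by simp only [List.length_nil]; omega)
  simp only [hcast] at this
  simpa using this
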